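-- pv_equiv track=rewrite | github.com/KsaweryKapela/GDT_PL_Validation_Analysis | visualization/helpers.py | generate_index_dict
-- ===== SOURCE A (Python) =====
-- import collections
--
-- def generate_index_dict(column):
--     column_dict = {}
--
--     for item in column:
--         if item in column_dict:
--             column_dict[item] += 1
--         else:
--             column_dict[item] = 1
--
--     ordered_column_dict = collections.OrderedDict(sorted(column_dict.items()))
--
--     return ordered_column_dict
-- ===== SOURCE B (Python) =====
-- import collections
-- import itertools
--
--
-- def generate_index_dict(column):
--     result = collections.OrderedDict()
--     for key, group in itertools.groupby(sorted(column)):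
--         result[key] = sum(1 for _ in group)
--     return result
-- ===== Notes on version B (the rewrite author's own statement) =====
-- stated objective: alternative
-- what changed: Replaces the hash-count-then-sort strategy (dict of counts built by membership tests, then sorted at the end) with a sort-first traversal: sort the column once and walk consecutive equal runs with itertools.groupby, emitting each key with its run length directly in order.
import Mathlib
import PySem

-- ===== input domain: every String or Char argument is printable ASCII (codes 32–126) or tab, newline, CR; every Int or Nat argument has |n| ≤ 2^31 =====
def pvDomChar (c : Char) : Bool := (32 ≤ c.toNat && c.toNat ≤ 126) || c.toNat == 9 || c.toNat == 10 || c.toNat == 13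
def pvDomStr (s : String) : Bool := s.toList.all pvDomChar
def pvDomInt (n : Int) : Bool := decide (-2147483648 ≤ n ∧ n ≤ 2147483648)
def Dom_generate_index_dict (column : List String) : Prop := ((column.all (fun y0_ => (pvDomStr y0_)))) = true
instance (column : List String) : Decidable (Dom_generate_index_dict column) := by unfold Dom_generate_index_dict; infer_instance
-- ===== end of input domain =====

-- ===== PORT A =====
-- A: count items in a dict (membership test, then += / = 1), then sort the items.
def generate_index_dict (column : List String) : List (String × Int) :=
  let column_dict : PySem.Dict String Int :=
    column.foldl (fun d item =>
      if d.contains item then d.insert item (d.getD item 0 + 1)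
      else d.insert item 1) PySem.Dict.empty
  PySem.List.sorted2 column_dict.items Prod.fst Prod.snd

-- ===== PORT B =====
-- B: sort the column first, then walk consecutive equal runs (itertools.groupby),
-- emitting (key, run length) pairs in order.
def pvGroupRuns : List String → List (String × Int)
  | [] => []
  | x :: xs =>
    (x, ((xs.takeWhile (· == x)).length : Int) + 1) :: pvGroupRuns (xs.dropWhile (· == x))
termination_by l => l.length
decreasing_by
  simp only [List.length_cons]
  exact Nat.lt_succ_of_le (List.length_dropWhile_le _ _)

def generate_index_dict_alt (column : List String) : List (String × Int) :=
  pvGroupRuns (PySem.List.sorted column (fun s => s))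

-- ===== PRECONDITION & SPEC =====
def Spec_generate_index_dict (column : List String) (out : List (String × Int)) : Prop := out = generate_index_dict_alt column
instance (column : List String) (out : List (String × Int)) : Decidable (Spec_generate_index_dict column out) := by unfold Spec_generate_index_dict; infer_instance

-- ===== CLAIM (what is proved, stated in full; the proofs are below) =====
def Claim_equal_generate_index_dict : Prop := ∀ (column : List String), Dom_generate_index_dict column → Spec_generate_index_dict column (generate_index_dict column)

-- ===== LEMMAS AND PROOFS =====

lemma pv_insertBy_congr {α : Type} (f g : α → α → Bool) (x : α) :
    ∀ (ys : List α), (∀ y ∈ ys, f x y = g x y) →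
      PySem.List.insertBy f x ys = PySem.List.insertBy g x ys := by
  intro ys
  induction ys with
  | nil => intro _; rfl
  | cons y t ih =>
      intro h
      simp only [PySem.List.insertBy]
      rw [h y (by simp)]
      by_cases hg : g x y = true
      · simp [hg]
      · simp only [Bool.not_eq_true] at hg
        simp [hg, ih (fun z hz => h z (by simp [hz]))]

lemma pv_foldl_insertBy_congr {α : Type} (f g : α → α → Bool) :
    ∀ (xs acc : List α), (∀ a b, a ∈ xs → (b ∈ xs ∨ b ∈ acc) → f a b = g a b) →
      xs.foldl (fun acc x => PySem.List.insertBy f x acc) acc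
        = xs.foldl (fun acc x => PySem.List.insertBy g x acc) acc := by
  intro xs
  induction xs with
  | nil => intro _ _; rfl
  | cons x t ih =>
      intro acc h
      simp only [List.foldl_cons]
      rw [pv_insertBy_congr f g x acc (fun y hy => h x y (by simp) (Or.inr hy))]
      exact ih _ (fun a b ha hb => h a b (by simp [ha]) (by
        rcases hb with hb | hb
        · exact Or.inl (by simp [hb])
        · rcases (PySem.List.mem_insertBy (before := g) (x := x) (ys := acc) (y := b)).1 hb with hb | hb
          · exact Or.inl (by simp [hb])
          · exact Or.inr hb))

-- on a list whose first keys are pairwise distinct, the tuple-key sort is the first-key sort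
lemma pv_sorted2_eq_sorted (l : List (String × Int))
    (hinj : ∀ a ∈ l, ∀ b ∈ l, a.1 = b.1 → a = b) :
    PySem.List.sorted2 l Prod.fst Prod.snd = PySem.List.sorted l Prod.fst := by
  simp only [PySem.List.sorted2, PySem.List.sorted, if_neg (by decide : ¬ (false = true))]
  apply pv_foldl_insertBy_congr
  intro a b ha hb
  rcases hb with hb | hb
  · rcases lt_trichotomy a.1 b.1 with hlt | heq | hgt
    · simp [hlt]
    · have : a = b := hinj a ha b hb heq
      subst this
      simp
    · simp [hgt, not_lt_of_gt hgt]
  · simp at hb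

lemma pv_dict_fold_eq_counter (column : List String) :
    column.foldl (fun d item =>
      if d.contains item then d.insert item (d.getD item 0 + 1)
      else d.insert item 1) PySem.Dict.empty = PySem.Dict.counter column := by
  rw [← PySem.Dict.foldl_insert_getD_add_one_eq_counter]
  apply PySem.List.foldl_congr_mem
  intro d item _
  by_cases h : d.contains item = true
  · simp [h]
  · have hget : d.get? item = none := by
      simp only [PySem.Dict.contains, List.any_eq_true] at h
      simp only [PySem.Dict.get?, Option.map_eq_none_iff, List.find?_eq_none]
      intro p hp
      simp only [Bool.not_eq_true]
      by_contra hc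
      exact h ⟨p, hp, by simpa using hc⟩
    simp [h, PySem.Dict.getD, hget]

-- the run-walk over a ≤-sorted list: keys are its elements without repetition, in strictly
-- increasing order, each paired with its multiplicity
lemma pv_groupRuns_spec : ∀ (l : List String), l.Pairwise (· ≤ ·) →
    (∀ p ∈ pvGroupRuns l, p.1 ∈ l ∧ p.2 = (l.count p.1 : Int)) ∧
    ((pvGroupRuns l).map Prod.fst).Pairwise (· < ·) ∧
    (∀ a ∈ l, a ∈ (pvGroupRuns l).map Prod.fst) := by
  intro l
  induction l using pvGroupRuns.induct with
  | case1 => intro _; exact ⟨by simp [pvGroupRuns], by simp [pvGroupRuns], by simp⟩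
  | case2 x xs ih =>
      intro h
      have hx : ∀ y ∈ xs, x ≤ y := by
        intro y hy; exact (List.pairwise_cons.1 h).1 y hy
      have hxs : xs.Pairwise (· ≤ ·) := (List.pairwise_cons.1 h).2
      set run := xs.takeWhile (· == x) with hrundef
      set rest := xs.dropWhile (· == x) with hrestdef
      have hsplit : run ++ rest = xs := List.takeWhile_append_dropWhile
      have hrun : ∀ y ∈ run, y = x := by
        intro y hy
        have := List.mem_takeWhile_imp hy
        simpa using this
      have hrest_sub : rest ⊆ xs := (List.dropWhile_sublist _).subset
      have hrest_sorted : rest.Pairwise (· ≤ ·) := hxs.sublist (List.dropWhile_sublist _)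
      have hxnotin : x ∉ rest := by
        intro hmem
        cases hr : rest with
        | nil => rw [hr] at hmem; simp at hmem
        | cons y t =>
            have hhd := List.head?_dropWhile_not (· == x) xs
            rw [← hrestdef, hr] at hhd
            simp only [List.head?_cons] at hhd
            have hyne : y ≠ x := by simpa using hhd
            rw [hr] at hmem
            rcases List.mem_cons.1 hmem with hmem | hmem
            · exact hyne hmem.symm
            · have h1 : y ≤ x := (List.pairwise_cons.1 (hr ▸ hrest_sorted)).1 x hmem
              have h2 : x ≤ y := hx y (hrest_sub (by rw [hr]; simp))
              exact hyne (le_antisymm h1 h2)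
      obtain ⟨ih1, ih2, ih3⟩ := ih hrest_sorted
      refine ⟨?_, ?_, ?_⟩
      · intro p hp
        simp only [pvGroupRuns, List.mem_cons] at hp
        rcases hp with hp | hp
        · subst hp
          constructor
          · simp
          · have hcx : xs.count x = run.length := by
              rw [← hsplit, List.count_append]
              have h1 : run.count x = run.length :=
                List.count_eq_length.2 (fun y hy => (hrun y hy).symm)
              have h2 : rest.count x = 0 := List.count_eq_zero.2 hxnotin
              omega
            simp only [List.count_cons_self, hcx]
            push_cast
            ring
        · obtain ⟨hp1, hp2⟩ := ih1 p hp
          have hpne : p.1 ≠ x := fun hc => hxnotin (hc ▸ hp1)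
          constructor
          · exact List.mem_cons_of_mem _ (hrest_sub hp1)
          · rw [hp2]
            congr 1
            have h1 : run.count p.1 = 0 :=
              List.count_eq_zero.2 (fun hc => hpne ((hrun p.1 hc)))
            rw [← hsplit, List.count_cons_of_ne (Ne.symm hpne), List.count_append, h1]
            omega
      · simp only [pvGroupRuns, List.map_cons]
        refine List.pairwise_cons.2 ⟨?_, ih2⟩
        intro b hb
        obtain ⟨p, hp, hpb⟩ := List.mem_map.1 hb
        obtain ⟨hp1, _⟩ := ih1 p hp
        have hble : x ≤ b := hpb ▸ hx p.1 (hrest_sub hp1)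
        have hbne : b ≠ x := fun hc => hxnotin (hc ▸ hpb ▸ hp1)
        exact lt_of_le_of_ne hble (Ne.symm hbne)
      · intro a ha
        simp only [pvGroupRuns, List.map_cons, List.mem_cons]
        rcases List.mem_cons.1 ha with ha | ha
        · exact Or.inl ha
        · rw [← hsplit] at ha
          rcases List.mem_append.1 ha with ha | ha
          · exact Or.inl (hrun a ha)
          · exact Or.inr (ih3 a ha)

-- ===== VERDICT (by name: the statement is the Claim_ definition above) =====
theorem generate_index_dict_spec : Claim_equal_generate_index_dict := by
  intro column _
  unfold Spec_generate_index_dict generate_index_dict generate_index_dict_alt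
  rw [pv_dict_fold_eq_counter]
  have hitems := PySem.Dict.items_counter column
  have hL : (PySem.List.sorted column (fun s => s)).Pairwise (· ≤ ·) :=
    PySem.List.sorted_pairwise column (fun s => s)
  obtain ⟨hG1, hG2, hG3⟩ := pv_groupRuns_spec _ hL
  have hM_nodup : ((pvGroupRuns (PySem.List.sorted column (fun s => s))).map Prod.fst).Nodup :=
    hG2.imp ne_of_lt
  have hM_mem : ∀ a, a ∈ (pvGroupRuns (PySem.List.sorted column (fun s => s))).map Prod.fst ↔
      a ∈ column := by
    intro a
    constructor
    · intro ha
      obtain ⟨p, hp, hpa⟩ := List.mem_map.1 ha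
      have := (hG1 p hp).1
      rw [← hpa]
      exact (PySem.List.mem_sorted _ _ _ _).1 this
    · intro ha
      exact hG3 a ((PySem.List.mem_sorted _ _ _ _).2 ha)
  have hperm : ((pvGroupRuns (PySem.List.sorted column (fun s => s))).map Prod.fst).Perm
      (PySem.Set.ofList column) := by
    refine (List.perm_ext_iff_of_nodup hM_nodup (PySem.Set.nodup_ofList column)).2 ?_
    intro a
    rw [hM_mem a, PySem.Set.mem_ofList]
  have hsortedset : PySem.List.sorted (PySem.Set.ofList column) (fun k => k)
      = (pvGroupRuns (PySem.List.sorted column (fun s => s))).map Prod.fst :=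
    PySem.List.sorted_eq_of_perm_of_pairwise_lt _ _ _ hperm hG2
  have hinj : ∀ a ∈ (PySem.Dict.counter column).items, ∀ b ∈ (PySem.Dict.counter column).items,
      a.1 = b.1 → a = b := by
    intro a ha b hb hab
    rw [hitems] at ha hb
    obtain ⟨ka, hka, hka2⟩ := List.mem_map.1 ha
    obtain ⟨kb, hkb, hkb2⟩ := List.mem_map.1 hb
    rw [← hka2, ← hkb2] at hab ⊢
    simp only at hab
    rw [hab]
  rw [pv_sorted2_eq_sorted _ hinj, hitems]
  have hmapsort : PySem.List.sorted
      ((PySem.Set.ofList column).map (fun k => (k, (column.count k : Int)))) Prod.fst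
      = (PySem.List.sorted (PySem.Set.ofList column) (fun k => k)).map
          (fun k => (k, (column.count k : Int))) := by
    apply PySem.List.sorted_eq_of_perm_of_pairwise_lt
    · exact List.Perm.map _ (PySem.List.sorted_perm _ _ _)
    · have hpw := PySem.List.sorted_ofList_pairwise_lt column
      exact hpw.map _ (fun a b hab => by simpa using hab)
  rw [hmapsort, hsortedset, List.map_map]
  have hid : ∀ p ∈ pvGroupRuns (PySem.List.sorted column (fun s => s)),
      ((fun k => (k, (column.count k : Int))) ∘ Prod.fst) p = id p := by
    intro p hp
    obtain ⟨hp1, hp2⟩ := hG1 p hp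
    have hc : (PySem.List.sorted column (fun s => s)).count p.1 = column.count p.1 :=
      (PySem.List.sorted_perm column (fun s => s) _).count_eq p.1
    simp only [Function.comp, id]
    rw [← hc, ← hp2]
  rw [List.map_congr_left hid, List.map_id]
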